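-- pv_equiv track=rewrite | github.com/manikyabard/steering-evals | validate_thinkedit_models.py | calculate_thinking_metrics
-- ===== SOURCE A (Python) =====
-- def calculate_thinking_metrics(thinking_text):
--     """Calculate metrics for thinking content."""
--     if not thinking_text:
--         return {"word_count": 0, "char_count": 0, "line_count": 0, "reasoning_steps": 0}
--
--     words = thinking_text.split()
--     lines = thinking_text.split("\n")
--
--     # Count reasoning steps (simple heuristic)
--     reasoning_indicators = [
--         "first",
--         "second",
--         "third",
--         "next",
--         "then",
--         "so",
--         "therefore",
--         "step",
--         "now",
--         "let's",
--         "we need",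
--         "i need",
--         "because",
--     ]
--     reasoning_steps = sum(1 for word in words if word.lower() in reasoning_indicators)
--
--     return {
--         "word_count": len(words),
--         "char_count": len(thinking_text),
--         "line_count": len([line for line in lines if line.strip()]),
--         "reasoning_steps": reasoning_steps,
--     }
-- ===== SOURCE B (Python) =====
-- REASONING_INDICATORS = (
--     "first", "second", "third", "next", "then", "so", "therefore",
--     "step", "now", "let's", "we need", "i need", "because",
-- )
--
--
-- def calculate_thinking_metrics(thinking_text):
--     """Calculate metrics for thinking content (indicator-outer counting, no early return)."""
--     words = thinking_text.split()
--     lowered = [w.lower() for w in words]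
--
--     # Iterate over the indicators (outer) and count occurrences in the lowered words.
--     steps = 0
--     for ind in REASONING_INDICATORS:
--         steps += lowered.count(ind)
--
--     # Count total lines and blank lines in one pass; non-blank = total - blank.
--     total_lines = 0
--     blank_lines = 0
--     for line in thinking_text.split("\n"):
--         total_lines += 1
--         if not line.strip():
--             blank_lines += 1
--
--     return {
--         "word_count": len(words),
--         "char_count": len(thinking_text),
--         "line_count": total_lines - blank_lines,
--         "reasoning_steps": steps,
--     }
-- ===== Notes on version B (the rewrite author's own statement) =====
-- stated objective: alternative
-- what changed: Loop structure is inverted: B drops the empty-text early return (the general path already yields all zeros), counts reasoning steps by iterating over the indicator list and counting each indicator in the pre-lowered word list (indicator-outer instead of word-outer membership scan), and computes line_count as total lines minus blank lines from one accumulator pass instead of filtering.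
import Mathlib
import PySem

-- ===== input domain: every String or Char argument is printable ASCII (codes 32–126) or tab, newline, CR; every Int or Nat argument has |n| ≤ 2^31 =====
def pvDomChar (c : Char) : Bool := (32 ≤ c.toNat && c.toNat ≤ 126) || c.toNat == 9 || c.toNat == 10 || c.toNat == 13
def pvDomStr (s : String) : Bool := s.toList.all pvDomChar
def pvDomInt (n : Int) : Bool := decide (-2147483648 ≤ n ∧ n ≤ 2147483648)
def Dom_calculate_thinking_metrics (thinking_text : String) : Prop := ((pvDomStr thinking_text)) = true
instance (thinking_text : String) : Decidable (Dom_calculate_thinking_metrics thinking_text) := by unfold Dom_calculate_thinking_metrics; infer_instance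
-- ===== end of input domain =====

-- B inverts the loops: no empty-text early return (the general path yields the same zeros),
-- reasoning steps counted indicator-outer over a pre-lowered word list, and line_count as
-- total lines minus blank lines from one accumulator pass (objective: alternative).

-- ===== PORT A =====
def calculate_thinking_metrics (thinking_text : String) : List (String × Int) :=
  if thinking_text = "" then
    [("word_count", 0), ("char_count", 0), ("line_count", 0), ("reasoning_steps", 0)]
  else
    let words := PySem.Str.split₀ thinking_text
    let lines := (PySem.Str.split? thinking_text "\n").getD []   -- split? is some: sep "\n" ≠ ""
    let reasoning_indicators : List String :=
      ["first", "second", "third", "next", "then", "so", "therefore",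
       "step", "now", "let's", "we need", "i need", "because"]
    let reasoning_steps : Int :=
      (words.map (fun word =>
        if PySem.Str.lower word ∈ reasoning_indicators then (1 : Int) else 0)).sum
    [("word_count", PySem.List.len words),
     ("char_count", PySem.Str.len thinking_text),
     ("line_count", PySem.List.len (lines.filter (fun line => PySem.Str.strip line ≠ ""))),
     ("reasoning_steps", reasoning_steps)]

-- ===== PORT B =====
-- module-level tuple REASONING_INDICATORS from Source B
def pvReasoningIndicators : List String :=
  ["first", "second", "third", "next", "then", "so", "therefore",
   "step", "now", "let's", "we need", "i need", "because"]

def calculate_thinking_metrics_alt (thinking_text : String) : List (String × Int) :=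
  let words := PySem.Str.split₀ thinking_text
  let lowered := words.map (fun w => PySem.Str.lower w)
  let steps : Int :=
    pvReasoningIndicators.foldl
      (fun acc ind => acc + (PySem.List.count lowered ind : Int)) 0
  let counts : Int × Int :=
    ((PySem.Str.split? thinking_text "\n").getD []).foldl
      (fun p line => (p.1 + 1, if PySem.Str.strip line = "" then p.2 + 1 else p.2)) (0, 0)
  [("word_count", PySem.List.len words),
   ("char_count", PySem.Str.len thinking_text),
   ("line_count", counts.1 - counts.2),
   ("reasoning_steps", steps)]

-- ===== PRECONDITION & SPEC =====
def Spec_calculate_thinking_metrics (thinking_text : String) (out : List (String × Int)) : Prop := out = calculate_thinking_metrics_alt thinking_text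
instance (thinking_text : String) (out : List (String × Int)) : Decidable (Spec_calculate_thinking_metrics thinking_text out) := by unfold Spec_calculate_thinking_metrics; infer_instance

-- ===== CLAIM (what is proved, stated in full; the proofs are below) =====
def Claim_equal_calculate_thinking_metrics : Prop := ∀ (thinking_text : String), Dom_calculate_thinking_metrics thinking_text → Spec_calculate_thinking_metrics thinking_text (calculate_thinking_metrics thinking_text)

-- ===== LEMMAS AND PROOFS =====

-- a nodup indicator list hit at most once: Σ_{i∈inds} [i = a] = [a ∈ inds]
lemma sum_map_ifeq_single (a : String) (inds : List String) (h : inds.Nodup) :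
    (inds.map (fun i => if i = a then (1 : Int) else 0)).sum
      = if a ∈ inds then (1 : Int) else 0 := by
  induction inds with
  | nil => simp
  | cons j js ih =>
    simp only [List.nodup_cons] at h
    rcases eq_or_ne j a with rfl | hj
    · simp [ih h.2, h.1]
    · simp [hj, Ne.symm hj, ih h.2]

-- indicator-outer counting equals per-element membership count (indicators nodup)
lemma sum_count_eq_countP (inds : List String) (h : inds.Nodup) (ls : List String) :
    (inds.map (fun i => ((ls.count i : Nat) : Int))).sum
      = ((ls.countP (fun x => decide (x ∈ inds)) : Nat) : Int) := by
  induction ls with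
  | nil => simp
  | cons a t ih =>
    have hcount : ∀ i : String, (((a :: t).count i : Nat) : Int)
        = ((t.count i : Nat) : Int) + (if i = a then (1 : Int) else 0) := by
      intro i
      rw [List.count_cons]
      by_cases hia : i = a
      · subst hia; push_cast; simp
      · simp [hia, Ne.symm hia]
    calc (inds.map (fun i => (((a :: t).count i : Nat) : Int))).sum
        = (inds.map (fun i => ((t.count i : Nat) : Int)
            + (if i = a then (1 : Int) else 0))).sum := by
          exact congrArg List.sum (List.map_congr_left (fun i _ => hcount i))
      _ = (inds.map (fun i => ((t.count i : Nat) : Int))).sum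
            + (inds.map (fun i => if i = a then (1 : Int) else 0)).sum :=
          PySem.List.sum_map_add_int inds _ _
      _ = ((t.countP (fun x => decide (x ∈ inds)) : Nat) : Int)
            + (if a ∈ inds then (1 : Int) else 0) := by
          rw [ih, sum_map_ifeq_single a inds h]
      _ = (((a :: t).countP (fun x => decide (x ∈ inds)) : Nat) : Int) := by
          rw [List.countP_cons]
          rcases em (a ∈ inds) with hm | hm <;> simp [hm]

-- the indicator list is duplicate-free
lemma indicators_nodup : pvReasoningIndicators.Nodup := by decide

-- A's per-word 0/1 sum equals B's indicator-outer foldl of counts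
lemma reasoning_steps_eq (words : List String) :
    (words.map (fun word =>
        if PySem.Str.lower word ∈ pvReasoningIndicators then (1 : Int) else 0)).sum
      = pvReasoningIndicators.foldl
          (fun acc ind =>
            acc + (PySem.List.count (words.map (fun w => PySem.Str.lower w)) ind : Int)) 0 := by
  rw [PySem.List.foldl_add]
  simp only [PySem.List.count_eq, zero_add]
  rw [sum_count_eq_countP _ indicators_nodup]
  have h1 : (words.map (fun word =>
      if PySem.Str.lower word ∈ pvReasoningIndicators then (1 : Int) else 0)).sum
    = ((words.map (fun w => PySem.Str.lower w)).map (fun x =>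
        if x ∈ pvReasoningIndicators then (1 : Int) else 0)).sum := by
    rw [List.map_map]; rfl
  rw [h1]
  have := PySem.List.sum_map_ite_one_zero
    (fun x => decide (x ∈ pvReasoningIndicators))
    (words.map (fun w => PySem.Str.lower w))
  simpa using this

-- B's pair-accumulator pass computes (total lines, blank lines)
lemma foldl_lines (ls : List String) (a b : Int) :
    ls.foldl (fun p line => (p.1 + 1, if PySem.Str.strip line = "" then p.2 + 1 else p.2)) (a, b)
      = (a + (ls.length : Int), b + (ls.countP (fun l => PySem.Str.strip l = "") : Int)) := by
  induction ls generalizing a b with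
  | nil => simp
  | cons x t ih =>
    rw [List.foldl_cons, ih]
    by_cases hx : PySem.Str.strip x = "" <;>
      simp only [hx, if_true, if_false, List.length_cons, List.countP_cons, decide_true,
        decide_false, Prod.mk.injEq] <;> constructor <;> push_cast <;> ring

-- A's filter length equals total minus blank
lemma line_count_eq (lines : List String) :
    PySem.List.len (lines.filter (fun line => PySem.Str.strip line ≠ ""))
      = (lines.length : Int) - (lines.countP (fun l => PySem.Str.strip l = "") : Int) := by
  rw [PySem.List.len_eq, ← List.countP_eq_length_filter]
  have hsplit : lines.countP (fun l => decide (PySem.Str.strip l ≠ ""))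
      + lines.countP (fun l => decide (PySem.Str.strip l = "")) = lines.length := by
    have := List.length_eq_countP_add_countP (l := lines)
      (p := fun l => decide (PySem.Str.strip l ≠ ""))
    rw [this]
    congr 1
    apply List.countP_congr
    intro x _
    by_cases hx : PySem.Str.strip x = "" <;> simp [hx]
  omega

-- ===== VERDICT (by name: the statement is the Claim_ definition above) =====
theorem calculate_thinking_metrics_spec : Claim_equal_calculate_thinking_metrics := by
  intro thinking_text _
  unfold Spec_calculate_thinking_metrics calculate_thinking_metrics calculate_thinking_metrics_alt
  by_cases h : thinking_text = ""
  · subst h; decide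
  · simp only [h, if_false]
    rw [show (["first", "second", "third", "next", "then", "so", "therefore",
       "step", "now", "let's", "we need", "i need", "because"] : List String)
         = pvReasoningIndicators from rfl]
    rw [reasoning_steps_eq, foldl_lines, line_count_eq]
    simp
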